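-- pv_equiv track=rewrite | github.com/ChamaELKHEMSANI/onda | onda_simulation.py | purge_bagages
-- ===== SOURCE A (Python) =====
-- def purge_bagages(liste,vols):
--     """
--     enlever les bagages des vols déjà partis
--     """
--     nouvelle_liste = []
--     bagages_rejete = 0
--     for item in liste:
--         if item[0]  in vols:
--             nouvelle_liste.append(item)
--         else:
--             bagages_rejete += item[1]
--     return nouvelle_liste,bagages_rejete
-- ===== SOURCE B (Python) =====
-- def purge_bagages(liste, vols):
--     """
--     enlever les bagages des vols déjà partis
--     """
--     vs = set(vols)
--     total = 0
--     for _, poids in liste: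
--         total += poids
--     nouvelle_liste = [item for item in liste if item[0] in vs]
--     poids_garde = 0
--     for _, poids in nouvelle_liste:
--         poids_garde += poids
--     return nouvelle_liste, total - poids_garde
-- ===== Notes on version B (the rewrite author's own statement) =====
-- stated objective: faster
-- what changed: B builds a set of vols once and never scans the rejected items' weights: it sums all weights, filters the kept items, and derives the rejected weight arithmetically as total minus kept weight (exact since weights are ints), instead of A's fused loop that accumulates rejected weights with a linear 'in vols' list scan per item.
import Mathlib
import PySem

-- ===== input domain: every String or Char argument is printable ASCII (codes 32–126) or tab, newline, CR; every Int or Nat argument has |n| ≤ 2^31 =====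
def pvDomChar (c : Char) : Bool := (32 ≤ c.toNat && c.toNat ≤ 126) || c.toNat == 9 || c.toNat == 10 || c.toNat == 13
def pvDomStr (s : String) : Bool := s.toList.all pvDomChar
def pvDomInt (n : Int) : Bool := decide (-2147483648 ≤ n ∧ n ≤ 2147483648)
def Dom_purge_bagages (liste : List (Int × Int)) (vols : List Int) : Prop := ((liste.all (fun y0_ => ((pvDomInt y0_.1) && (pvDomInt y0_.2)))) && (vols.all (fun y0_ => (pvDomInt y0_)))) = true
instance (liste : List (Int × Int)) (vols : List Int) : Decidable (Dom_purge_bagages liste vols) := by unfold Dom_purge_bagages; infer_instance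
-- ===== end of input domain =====

-- B builds a set of vols once and derives the rejected weight as total weight minus kept weight (exact on ints), instead of A's fused loop scanning vols per item; return-value equivalence.

-- ===== PORT A =====
-- one fused loop over liste carrying (nouvelle_liste, bagages_rejete), 'in vols' a list scan
def purge_bagages (liste : List (Int × Int)) (vols : List Int) : (List (Int × Int)) × Int :=
  liste.foldl
    (fun st item =>
      if vols.contains item.1 then (st.1 ++ [item], st.2)
      else (st.1, st.2 + item.2))
    ([], 0)

-- ===== PORT B =====
-- set of vols; total-weight loop; filter kept; kept-weight loop; rejected = total - kept
def purge_bagages_alt (liste : List (Int × Int)) (vols : List Int) : (List (Int × Int)) × Int :=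
  let vs : PySem.Set Int := PySem.Set.ofList vols
  let total : Int := liste.foldl (fun acc item => acc + item.2) 0
  let nouvelle_liste := liste.filter (fun item => PySem.Set.contains vs item.1)
  let poids_garde : Int := nouvelle_liste.foldl (fun acc item => acc + item.2) 0
  (nouvelle_liste, total - poids_garde)

-- ===== PRECONDITION & SPEC =====
def Spec_purge_bagages (liste : List (Int × Int)) (vols : List Int) (out : (List (Int × Int)) × Int) : Prop := out = purge_bagages_alt liste vols
instance (liste : List (Int × Int)) (vols : List Int) (out : (List (Int × Int)) × Int) : Decidable (Spec_purge_bagages liste vols out) := by unfold Spec_purge_bagages; infer_instance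

-- ===== CLAIM (what is proved, stated in full; the proofs are below) =====
def Claim_equal_purge_bagages : Prop := ∀ (liste : List (Int × Int)) (vols : List Int), Dom_purge_bagages liste vols → Spec_purge_bagages liste vols (purge_bagages liste vols)

-- ===== LEMMAS AND PROOFS =====

-- a foldl-(+ .2) accumulator is the sum of the second components
theorem foldl_add_snd (liste : List (Int × Int)) (s : Int) :
    liste.foldl (fun acc item => acc + item.2) s = s + (liste.map (fun item => item.2)).sum := by
  induction liste generalizing s with
  | nil => simp
  | cons hd tl ih => simp [ih, add_assoc]

-- loop invariant for A's fold: kept items are the filter, rejected weight is the complement's weight sum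
theorem purge_bagages_fold_inv (vols : List Int) (liste : List (Int × Int))
    (acc : List (Int × Int)) (s : Int) :
    liste.foldl
      (fun st item =>
        if vols.contains item.1 then (st.1 ++ [item], st.2)
        else (st.1, st.2 + item.2))
      (acc, s)
    = (acc ++ liste.filter (fun item => vols.contains item.1),
       s + ((liste.filter (fun item => !vols.contains item.1)).map (fun item => item.2)).sum) := by
  induction liste generalizing acc s with
  | nil => simp
  | cons hd tl ih =>
    rw [List.foldl_cons]
    by_cases h : vols.contains hd.1
    · rw [if_pos h, ih]
      have h' : hd.1 ∈ vols := by simpa using h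
      simp [h']
    · rw [if_neg h, ih]
      have h' : hd.1 ∉ vols := by simpa using h
      simp [h', add_assoc]

-- total weight splits over the filter partition
theorem sum_filter_split (p : (Int × Int) → Bool) (liste : List (Int × Int)) :
    (liste.map (fun item => item.2)).sum
      = ((liste.filter p).map (fun item => item.2)).sum
        + ((liste.filter (fun item => !p item)).map (fun item => item.2)).sum := by
  induction liste with
  | nil => simp
  | cons hd tl ih =>
    by_cases h : p hd
    · simp [h, ih, add_assoc]
    · simp [h, ih]; ring

-- ===== VERDICT (by name: the statement is the Claim_ definition above) =====
theorem purge_bagages_spec : Claim_equal_purge_bagages := by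
  intro liste vols _
  show _ = _
  have hfn : (fun item : Int × Int => PySem.Set.contains (PySem.Set.ofList vols) item.1)
      = (fun item : Int × Int => vols.contains item.1) := by
    funext item
    simp [PySem.Set.contains, PySem.Set.mem_ofList]
  simp only [purge_bagages, purge_bagages_alt, purge_bagages_fold_inv, hfn, foldl_add_snd,
    zero_add]
  refine Prod.ext rfl ?_
  simp only []
  rw [sum_filter_split (fun item => vols.contains item.1) liste]
  ring
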